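-- pv_equiv track=rewrite | github.com/xftxyz2001/adtest | gm.py | gm
-- ===== SOURCE A (Python) =====
-- def gm(g, m):
--     n_cnt = [len(g), 0]
--     x = [-1]*n_cnt[0]
--     res = []
--
--     def same(i):
--         for j in range(len(g)):
--             if g[i][j] == 1 and x[i] == x[j]:
--                 return False
--         return True
--
--     def dfs(i):
--         if i >= n_cnt[0]:
--             n_cnt[1] += 1
--             res.append(x[:])
--             return
--         for j in range(m):
--             x[i] = j
--             if same(i):
--                 dfs(i+1)
--             x[i] = -1
--     dfs(0)
--     return n_cnt[1], res
-- ===== SOURCE B (Python) =====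
-- def gm(g, m):
--     n = len(g)
--     # breadth-first generation of all complete colorings in lexicographic order
--     candidates = [[]]
--     for _ in range(n):
--         candidates = [c + [j] for c in candidates for j in range(m)]
--     # keep a coloring iff no edge of the lower triangle (j <= i) joins equal colors
--     res = [c for c in candidates
--            if all(g[i][j] != 1 or c[i] != c[j]
--                   for i in range(n) for j in range(i + 1))]
--     return len(res), res
-- ===== Notes on version B (the rewrite author's own statement) =====
-- stated objective: idiomatic
-- what changed: Replaced the mutating recursive backtracking (in-place x, pruning via same(i), counter cell) with a generate-and-test pass: build all complete colorings breadth-first in lexicographic order, then keep those whose lower-triangle (j <= i) edges are conflict-free.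
-- outside the precondition, e.g. on gm([[1, 1], [1]], 1): A returns (0, []), B returns (0, []); on gm([[1], [], [], []], 4000): A returns (0, []), B does not finish within the time limit; on gm([[0, 0], [0]], 1): A raises IndexError, B raises IndexError
import Mathlib
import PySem

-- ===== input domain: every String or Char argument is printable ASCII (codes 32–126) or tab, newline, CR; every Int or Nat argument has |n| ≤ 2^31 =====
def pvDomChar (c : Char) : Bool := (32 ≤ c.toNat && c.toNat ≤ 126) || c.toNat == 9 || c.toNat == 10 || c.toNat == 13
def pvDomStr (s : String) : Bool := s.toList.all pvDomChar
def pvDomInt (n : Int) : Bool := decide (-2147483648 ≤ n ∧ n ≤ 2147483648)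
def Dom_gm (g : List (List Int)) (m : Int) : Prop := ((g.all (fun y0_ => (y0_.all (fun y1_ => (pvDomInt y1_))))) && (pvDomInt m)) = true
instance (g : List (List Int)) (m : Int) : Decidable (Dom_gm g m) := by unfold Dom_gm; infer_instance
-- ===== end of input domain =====

-- B replaces A's mutating recursive backtracking with a breadth-first generate-and-test
-- pass over all complete colorings (same results, in the same lexicographic order);
-- A's in-place mutation is of local lists only, nothing observable by the caller.

-- ===== PORT A =====
-- same(i): scans the whole row i, comparing against x (unassigned slots hold -1)
def gmSame (g : List (List Int)) (x : List Int) (i : Nat) : Bool :=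
  (List.range g.length).all (fun j =>
    !((((g.getD i []).getD j 0) == 1) && ((x.getD i (-1)) == (x.getD j (-1)))))

-- dfs(i), with fuel = n - i making the structural recursion explicit;
-- the counter cell n_cnt[1] and res are threaded as the accumulator `acc`
def gmDfs (g : List (List Int)) (m : Int) : Nat → Nat → List Int → Int × List (List Int) → Int × List (List Int)
  | 0, _, x, acc => (acc.1 + 1, acc.2 ++ [x])
  | fuel+1, i, x, acc =>
    (PySem.List.pyRange 0 m 1).foldl
      (fun acc j =>
        let x' := x.set i j
        if gmSame g x' i then gmDfs g m fuel (i+1) x' acc else acc) acc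

def gm (g : List (List Int)) (m : Int) : Int × List (List Int) :=
  gmDfs g m g.length 0 (List.replicate g.length (-1)) (0, [])

-- ===== PORT B =====
-- the lower-triangle conflict test of Source B
def gmOk (g : List (List Int)) (c : List Int) : Bool :=
  (List.range g.length).all (fun i =>
    (List.range (i+1)).all (fun j =>
      (((g.getD i []).getD j 0) != 1) || ((c.getD i 0) != (c.getD j 0))))

def gm_alt (g : List (List Int)) (m : Int) : Int × List (List Int) :=
  let n := g.length
  let cands := (List.range n).foldl
    (fun cs _ => cs.flatMap (fun c => (PySem.List.pyRange 0 m 1).map (fun j => c ++ [j])))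
    [[]]
  let res := cands.filter (fun c => gmOk g c)
  ((res.length : Int), res)

-- ===== PRECONDITION & SPEC =====
-- Pre_: if the colour loop runs at all (m > 0 and g nonempty), every row must have
-- length ≥ len(g), since A's same(i) reads g[i][j] for all j < len(g); on ragged inputs
-- with m > 0 A usually raises IndexError (a short-circuiting conflict can let both
-- programs return early on some of them — see the cited examples).
def Pre_gm (g : List (List Int)) (m : Int) : Prop :=
  g = [] ∨ m ≤ 0 ∨ ∀ row ∈ g, g.length ≤ row.length

instance (g : List (List Int)) (m : Int) : Decidable (Pre_gm g m) := by unfold Pre_gm; infer_instance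

def pvWitness_gm : List (List Int) × Int := ([[0, 1], [1, 0]], 2)

def Spec_gm (g : List (List Int)) (m : Int) (out : Int × List (List Int)) : Prop := out = gm_alt g m
instance (g : List (List Int)) (m : Int) (out : Int × List (List Int)) : Decidable (Spec_gm g m out) := by unfold Spec_gm; infer_instance

-- ===== CLAIM (what is proved, stated in full; the proofs are below) =====
def Claim_equal_gm : Prop := ∀ (g : List (List Int)) (m : Int), Dom_gm g m → Pre_gm g m → Spec_gm g m (gm g m)

-- ===== LEMMAS AND PROOFS =====

-- pure (accumulator-free) form of A's dfs: the list of colorings it appends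
def gmE (g : List (List Int)) (m : Int) : Nat → Nat → List Int → List (List Int)
  | 0, _, x => [x]
  | fuel+1, i, x =>
    (PySem.List.pyRange 0 m 1).flatMap (fun j =>
      let x' := x.set i j
      if gmSame g x' i then gmE g m fuel (i+1) x' else [])

-- B's candidate tuples, prepend-style (lexicographic)
def gmT (m : Int) : Nat → List (List Int)
  | 0 => [[]]
  | k+1 => (PySem.List.pyRange 0 m 1).flatMap (fun j => (gmT m k).map (j :: ·))

-- one row of B's conflict test
def gmRow (g : List (List Int)) (c : List Int) (i : Nat) : Bool :=
  (List.range (i+1)).all (fun j =>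
    (((g.getD i []).getD j 0) != 1) || ((c.getD i 0) != (c.getD j 0)))

-- B's conflict test restricted to rows i, i+1, …, i+fuel-1
def gmV (g : List (List Int)) (c : List Int) : Nat → Nat → Bool
  | _, 0 => true
  | i, fuel+1 => gmRow g c i && gmV g c (i+1) fuel

lemma getD_set_ne (x : List Int) (i k : Nat) (j d : Int) (h : k ≠ i) :
    (x.set i j).getD k d = x.getD k d := by
  simp [List.getD, List.getElem?_set_ne (by omega : i ≠ k)]

lemma getD_set_eq (x : List Int) (i : Nat) (j d : Int) (h : i < x.length) :
    (x.set i j).getD i d = j := by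
  simp [List.getD, h]

lemma getD_take (x : List Int) (i k : Nat) (d : Int) (h : k < i) :
    (x.take i).getD k d = x.getD k d := by
  simp [List.getD, h]

lemma getD_append_length (l1 l2 : List Int) (a d : Int) (i : Nat) (h : l1.length = i) :
    (l1 ++ a :: l2).getD i d = a := by
  subst h; simp [List.getD]

lemma take_set (x : List Int) (i : Nat) (j : Int) (h : i < x.length) :
    (x.set i j).take (i+1) = x.take i ++ [j] := by
  rw [List.set_eq_take_append_cons_drop, if_pos h]
  rw [List.take_append]
  simp [List.length_take, Nat.min_eq_left (le_of_lt h), List.take_take]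

lemma filterMap_if_eq_filter (l : List (List Int)) (p : List Int → Bool) :
    l.filterMap (fun t => if p t then some t else none) = l.filter p := by
  induction l with
  | nil => rfl
  | cons a l ih =>
    by_cases h : p a <;> simp [h, ih]

lemma gmRow_congr (g : List (List Int)) (c c' : List Int) (i : Nat)
    (h : ∀ j', j' ≤ i → c.getD j' 0 = c'.getD j' 0) :
    gmRow g c i = gmRow g c' i := by
  unfold gmRow
  rw [Bool.eq_iff_iff, List.all_eq_true, List.all_eq_true]
  have key : ∀ j' ∈ List.range (i+1),
      ((((g.getD i []).getD j' 0) != 1) || ((c.getD i 0) != (c.getD j' 0)))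
      = ((((g.getD i []).getD j' 0) != 1) || ((c'.getD i 0) != (c'.getD j' 0))) := by
    intro j' hj'
    simp only [List.mem_range] at hj'
    rw [h i (le_refl i), h j' (by omega)]
  exact ⟨fun hall a ha => (key a ha) ▸ hall a ha, fun hall a ha => (key a ha) ▸ hall a ha⟩

-- same(i) agrees with B's row test when slots > i still hold -1 and x[i] is a colour ≥ 0
lemma same_eq_row (g : List (List Int)) (x : List Int) (i : Nat)
    (hlen : x.length = g.length) (hi : i < g.length)
    (hj : 0 ≤ x.getD i (-1))
    (htail : ∀ k, i < k → k < g.length → x.getD k (-1) = -1) :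
    gmSame g x i = gmRow g x i := by
  unfold gmSame gmRow
  rw [show g.length = (i+1) + (g.length - (i+1)) by omega, List.range_add, List.all_append]
  have h2 : ((List.range (g.length - (i+1))).map ((i+1) + ·)).all
      (fun j => !((((g.getD i []).getD j 0) == 1) && ((x.getD i (-1)) == (x.getD j (-1))))) = true := by
    rw [List.all_eq_true]
    intro a ha
    simp only [List.mem_map, List.mem_range] at ha
    obtain ⟨k, hk, rfl⟩ := ha
    have ht := htail (i+1+k) (by omega) (by omega)
    have hb : (x.getD i (-1) == (-1 : Int)) = false := by
      simp only [beq_eq_false_iff_ne]; omega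
    simp only [ht, hb, Bool.and_false, Bool.not_false]
  rw [h2, Bool.and_true]
  rw [Bool.eq_iff_iff, List.all_eq_true, List.all_eq_true]
  have key : ∀ j' ∈ List.range (i+1),
      ((!((((g.getD i []).getD j' 0) == 1) && ((x.getD i (-1)) == (x.getD j' (-1))))) = true
       ↔ ((((g.getD i []).getD j' 0) != 1) || ((x.getD i 0) != (x.getD j' 0))) = true) := by
    intro j' hj'
    simp only [List.mem_range] at hj'
    have hj'x : j' < x.length := by omega
    have hix : i < x.length := by omega
    rw [List.getD_eq_getElem x (-1) hix, List.getD_eq_getElem x (-1) hj'x,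
        List.getD_eq_getElem x 0 hix, List.getD_eq_getElem x 0 hj'x]
    simp only [bne, ← Bool.not_and]
  exact ⟨fun h a ha => (key a ha).mp (h a ha), fun h a ha => (key a ha).mpr (h a ha)⟩

-- A's dfs equals "old accumulator plus the pure list gmE"
lemma gmDfs_eq (g : List (List Int)) (m : Int) :
    ∀ fuel i x acc, gmDfs g m fuel i x acc
      = (acc.1 + ((gmE g m fuel i x).length : Int), acc.2 ++ gmE g m fuel i x) := by
  intro fuel
  induction fuel with
  | zero => intro i x acc; simp [gmDfs, gmE]
  | succ fuel ih =>
    intro i x acc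
    simp only [gmDfs, gmE]
    generalize PySem.List.pyRange 0 m 1 = js
    induction js generalizing acc with
    | nil => simp
    | cons j js ihl =>
      simp only [List.foldl_cons, List.flatMap_cons]
      rw [ihl]
      by_cases h : gmSame g (x.set i j) i
      · simp only [h, if_pos, ih]
        simp [List.length_append, add_assoc]
      · simp [h]

-- MAIN: the DFS's list is the lexicographic candidate list filtered by rows ≥ i
lemma gmE_eq (g : List (List Int)) (m : Int) :
    ∀ fuel i x, x.length = g.length → i + fuel = g.length →
      (∀ k, i ≤ k → k < g.length → x.getD k (-1) = -1) →
      gmE g m fuel i x = (gmT m fuel).filterMap (fun t =>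
        if gmV g (x.take i ++ t) i fuel then some (x.take i ++ t) else none) := by
  intro fuel
  induction fuel with
  | zero =>
    intro i x hlen hif htail
    have hix : i = x.length := by omega
    simp [gmE, gmT, gmV, hix, List.take_length]
  | succ fuel ih =>
    intro i x hlen hif htail
    have hixlt : i < x.length := by omega
    have hcons : ∀ (j : Int) (t : List Int),
        x.take i ++ j :: t = (x.set i j).take (i+1) ++ t := by
      intro j t
      rw [take_set x i j hixlt, List.append_assoc, List.singleton_append]
    simp only [gmE, gmT]
    rw [List.filterMap_flatMap]
    apply List.flatMap_congr
    intro j hjmem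
    have hj0 : 0 ≤ j := (PySem.List.mem_pyRange_one.mp hjmem).1
    rw [List.filterMap_map]
    have hx'len : (x.set i j).length = g.length := by rw [List.length_set]; exact hlen
    have hx'i : (x.set i j).getD i (-1) = j := getD_set_eq x i j (-1) hixlt
    have hx'tail : ∀ k, i+1 ≤ k → k < g.length → (x.set i j).getD k (-1) = -1 := by
      intro k hk1 hk2
      rw [getD_set_ne x i k j (-1) (by omega)]
      exact htail k (by omega) hk2
    have hrow : ∀ t : List Int, gmRow g (x.take i ++ j :: t) i = gmRow g (x.set i j) i := by
      intro t
      apply gmRow_congr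
      intro j' hj'
      rcases Nat.lt_or_ge j' i with h | h
      · rw [List.getD_append _ _ _ _ (by simp [List.length_take]; omega),
            getD_take x i j' 0 h, getD_set_ne x i j' j 0 (by omega)]
      · have hj'i : j' = i := by omega
        subst hj'i
        have hlt : (x.take j').length = j' := by simp [List.length_take]; omega
        rw [getD_append_length _ _ _ _ _ hlt, getD_set_eq x j' j 0 hixlt]
    have hsame : gmSame g (x.set i j) i = gmRow g (x.set i j) i := by
      apply same_eq_row g (x.set i j) i hx'len (by omega)
      · rw [hx'i]; exact hj0
      · intro k hk1 hk2; exact hx'tail k (by omega) hk2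
    by_cases hb : gmSame g (x.set i j) i
    · simp only [hb, if_pos]
      rw [ih (i+1) (x.set i j) hx'len (by omega) hx'tail]
      congr 1
      funext t
      simp only [Function.comp_apply]
      rw [show gmV g (x.take i ++ j :: t) i (fuel+1)
            = (gmRow g (x.take i ++ j :: t) i && gmV g (x.take i ++ j :: t) (i+1) fuel) from rfl,
          hrow t, ← hsame, hb, Bool.true_and, hcons j t]
    · simp only [hb, Bool.false_eq_true, not_false_iff, if_neg]
      have hnone : ∀ t : List Int,
          (if gmV g (x.take i ++ j :: t) i (fuel+1) then some (x.take i ++ j :: t) else none)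
            = (none : Option (List Int)) := by
        intro t
        rw [show gmV g (x.take i ++ j :: t) i (fuel+1)
              = (gmRow g (x.take i ++ j :: t) i && gmV g (x.take i ++ j :: t) (i+1) fuel) from rfl,
            hrow t, ← hsame]
        simp [hb]
      simp [hnone]

lemma gmT_succ_append (m : Int) :
    ∀ k, gmT m (k+1)
      = (gmT m k).flatMap (fun c => (PySem.List.pyRange 0 m 1).map (fun j => c ++ [j])) := by
  intro k
  induction k with
  | zero => rw [gmT, gmT]; simp; exact (List.map_eq_flatMap).symm
  | succ k ih =>
    conv_lhs => rw [gmT, ih]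
    conv_rhs => rw [gmT]
    simp [List.map_flatMap, List.flatMap_map, List.flatMap_assoc, List.map_map, Function.comp_def, List.cons_append]

lemma gmCands_eq (m : Int) :
    ∀ k, (List.range k).foldl
        (fun cs _ => cs.flatMap (fun c => (PySem.List.pyRange 0 m 1).map (fun j => c ++ [j])))
        [[]]
      = gmT m k := by
  intro k
  induction k with
  | zero => simp [gmT]
  | succ k ih => rw [List.range_succ, List.foldl_append, List.foldl_cons, List.foldl_nil, ih, ← gmT_succ_append]

lemma gmV_eq_range' (g : List (List Int)) (c : List Int) :
    ∀ fuel i, gmV g c i fuel = (List.range' i fuel).all (gmRow g c) := by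
  intro fuel
  induction fuel with
  | zero => intro i; simp [gmV]
  | succ fuel ih => intro i; rw [List.range'_succ]; simp [gmV, ih]

lemma gmV_eq_ok (g : List (List Int)) (c : List Int) :
    gmV g c 0 g.length = gmOk g c := by
  rw [gmV_eq_range', ← List.range_eq_range']
  rfl

-- ===== VERDICT (by name: the statement is the Claim_ definition above) =====
theorem gm_spec : Claim_equal_gm := by
  intro g m _dom _pre
  unfold Spec_gm gm gm_alt
  rw [gmDfs_eq]
  rw [gmE_eq g m g.length 0 (List.replicate g.length (-1)) (by simp) (by omega)
      (by intro k _ hk; simp [List.getD, hk])]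
  simp only [List.take_zero, List.nil_append]
  have hfun : (fun t => if gmV g t 0 g.length then some t else none)
      = (fun t => if gmOk g t then some t else none) := by
    funext t; rw [gmV_eq_ok]
  rw [hfun, filterMap_if_eq_filter, gmCands_eq]
  simp
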